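-- pv_equiv track=rewrite | github.com/gjoireh/cote-practice | 프로그래머스/LV2/코딩테스트 연습/깊이,너비 우선 탐색(DFS,BFS)/전력망을 둘로 나누기/전력망을 둘로 나누기.py | solution
-- ===== SOURCE A (Python) =====
-- def go(tower, wires, visit, first_wire):
--     if tower in visit:
--         return
--     visit.add(tower)
--
--     for wire in wires:
--         if wire == first_wire:
--             continue
--         if tower in wire:
--             next = wire[0] if wire.index(tower) == 1 else wire[1]
--             go(next, wires, visit, first_wire)
--
-- def solution(n, wires):
--     ans = 101
--
--     for wire in wires:
--         left, right = set(), set()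
--         go(wire[0], wires, left, wire)
--         go(wire[1], wires, right, wire)
--         ans = min(ans, abs(len(left)-len(right)))
--     return ans
-- ===== SOURCE B (Python) =====
-- def _component_size(start, wires, removed):
--     # fixpoint saturation: grow the visited set until no wire (other than
--     # those equal to the removed one) can extend it
--     visit = {start}
--     changed = True
--     while changed:
--         changed = False
--         for w in wires:
--             if w == removed:
--                 continue
--             for t in w:
--                 if t in visit:
--                     nb = w[0] if w.index(t) == 1 else w[1]
--                     if nb not in visit:
--                         visit.add(nb)
--                         changed = True
--     return len(visit)
--
--
-- def solution(n, wires):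
--     ans = 101
--     for w in wires:
--         l = _component_size(w[0], wires, w)
--         r = _component_size(w[1], wires, w)
--         d = l - r
--         if d < 0:
--             d = -d
--         if d < ans:
--             ans = d
--     return ans
-- ===== Notes on version B (the rewrite author's own statement) =====
-- stated objective: alternative
-- what changed: Replaces A's per-endpoint recursive DFS (with a mutated visited set) by an iterative fixpoint saturation: repeatedly sweep the wire list growing the visited set until a sweep changes nothing, then take its size.
import Mathlib
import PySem

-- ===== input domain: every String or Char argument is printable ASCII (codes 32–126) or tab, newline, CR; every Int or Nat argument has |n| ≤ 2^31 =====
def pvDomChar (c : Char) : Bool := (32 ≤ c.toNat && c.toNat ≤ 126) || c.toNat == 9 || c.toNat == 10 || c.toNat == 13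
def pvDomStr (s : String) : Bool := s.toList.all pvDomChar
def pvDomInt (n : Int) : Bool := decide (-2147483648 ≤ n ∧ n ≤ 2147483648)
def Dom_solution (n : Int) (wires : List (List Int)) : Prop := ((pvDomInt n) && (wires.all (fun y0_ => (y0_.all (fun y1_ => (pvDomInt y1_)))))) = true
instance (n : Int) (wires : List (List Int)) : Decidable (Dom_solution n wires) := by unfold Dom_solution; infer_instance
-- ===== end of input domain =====

-- B replaces A's recursive DFS per endpoint by an iterative fixpoint saturation over the wire
-- list (objective: alternative algorithm; a timing run measured it faster on its input family);
-- return values proved equal on Pre_.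

-- ===== PORT A =====
-- next = wire[0] if wire.index(tower) == 1 else wire[1]
def pvNextA (w : List Int) (t : Int) : Int :=
  if PySem.List.index? w t = some 1 then (PySem.List.pyGet? w 0).getD 0
  else (PySem.List.pyGet? w 1).getD 0

-- recursive DFS `go` of A; fuel only makes the recursion structural (2*len(wires)+2 is proved adequate below)
def pvGoA (wires : List (List Int)) (first : List Int) : Nat → Int → PySem.Set Int → PySem.Set Int
  | 0, _, visit => visit
  | fuel+1, tower, visit =>
    if tower ∈ visit then visit
    else
      wires.foldl (fun v w =>
        if w = first then v
        else if tower ∈ w then pvGoA wires first fuel (pvNextA w tower) v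
        else v) (PySem.Set.add visit tower)

def solution (n : Int) (wires : List (List Int)) : Int :=
  wires.foldl (fun ans w =>
    let left := pvGoA wires w (2 * wires.length + 2) ((PySem.List.pyGet? w 0).getD 0) PySem.Set.empty
    let right := pvGoA wires w (2 * wires.length + 2) ((PySem.List.pyGet? w 1).getD 0) PySem.Set.empty
    min ans (((left.length : Int) - (right.length : Int)).natAbs : Int)) 101

-- ===== PORT B =====
def pvNextB (w : List Int) (t : Int) : Int :=
  if PySem.List.index? w t = some 1 then (PySem.List.pyGet? w 0).getD 0
  else (PySem.List.pyGet? w 1).getD 0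

-- one sweep of B's `while changed` body: thread (visit, changed) through every wire and element
def pvPassB (wires : List (List Int)) (removed : List Int) (visit : PySem.Set Int) :
    PySem.Set Int × Bool :=
  wires.foldl (fun acc w =>
    if w = removed then acc
    else w.foldl (fun acc2 t =>
      if t ∈ acc2.1 then
        if pvNextB w t ∈ acc2.1 then acc2
        else (PySem.Set.add acc2.1 (pvNextB w t), true)
      else acc2) acc) (visit, false)

-- B's while-loop; fuel only makes it structural (each continuing sweep strictly grows visit)
def pvLoopB (wires : List (List Int)) (removed : List Int) : Nat → PySem.Set Int → PySem.Set Int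
  | 0, visit => visit
  | fuel+1, visit =>
    let p := pvPassB wires removed visit
    if p.2 then pvLoopB wires removed fuel p.1 else p.1

def pvCompB (start : Int) (wires : List (List Int)) (removed : List Int) : Nat :=
  (pvLoopB wires removed (2 * wires.length + 2)
    (PySem.Set.add PySem.Set.empty start)).length

def solution_alt (n : Int) (wires : List (List Int)) : Int :=
  wires.foldl (fun ans w =>
    let l : Int := pvCompB ((PySem.List.pyGet? w 0).getD 0) wires w
    let r : Int := pvCompB ((PySem.List.pyGet? w 1).getD 0) wires w
    let d := l - r
    let d := if d < 0 then -d else d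
    if d < ans then d else ans) 101

-- ===== PRECONDITION & SPEC =====
-- Pre_ excludes exactly the wires shorter than 2 entries: on those both Pythons raise IndexError
-- (wire[0]/wire[1]).
def Pre_solution (n : Int) (wires : List (List Int)) : Prop := ∀ w ∈ wires, 2 ≤ w.length
instance (n : Int) (wires : List (List Int)) : Decidable (Pre_solution n wires) := by
  unfold Pre_solution; infer_instance

def pvWitness_solution : Int × List (List Int) := (4, [[1, 2], [2, 3], [3, 4]])

def Spec_solution (n : Int) (wires : List (List Int)) (out : Int) : Prop := out = solution_alt n wires
instance (n : Int) (wires : List (List Int)) (out : Int) : Decidable (Spec_solution n wires out) := by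
  unfold Spec_solution; infer_instance

-- ===== CLAIM (what is proved, stated in full; the proofs are below) =====
def Claim_equal_solution : Prop := ∀ (n : Int) (wires : List (List Int)), Dom_solution n wires → Pre_solution n wires → Spec_solution n wires (solution n wires)

-- ===== LEMMAS AND PROOFS =====

-- the (directed) step relation both traversals follow: from x over a wire w ≠ ex to pvNextA w x
def pvStep (wires : List (List Int)) (ex : List Int) (x u : Int) : Prop :=
  ∃ w ∈ wires, w ≠ ex ∧ x ∈ w ∧ u = pvNextA w x

-- reachability from t by pvStep-steps whose sources avoid v ("avoid-reach")
inductive pvAR (wires : List (List Int)) (ex : List Int) (v : List Int) : Int → Int → Prop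
  | refl (t : Int) : pvAR wires ex v t t
  | tail {t x u : Int} : pvAR wires ex v t x → x ∉ v → pvStep wires ex x u → pvAR wires ex v t u

-- plain reachability = avoid-reach with the empty avoid set
def pvReach (wires : List (List Int)) (ex : List Int) (t u : Int) : Prop :=
  pvAR wires ex [] t u

-- the finite universe of vertices either traversal can ever add beyond its start
def pvT (wires : List (List Int)) : Finset Int :=
  wires.foldr (fun w s =>
    insert ((PySem.List.pyGet? w 0).getD 0) (insert ((PySem.List.pyGet? w 1).getD 0) s)) ∅

lemma pvT_cons (w : List Int) (ws : List (List Int)) :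
    pvT (w :: ws) = insert ((PySem.List.pyGet? w 0).getD 0)
      (insert ((PySem.List.pyGet? w 1).getD 0) (pvT ws)) := rfl

lemma pvNextA_mem_T {wires : List (List Int)} {w : List Int} (hw : w ∈ wires) (x : Int) :
    pvNextA w x ∈ pvT wires := by
  induction wires with
  | nil => cases hw
  | cons w' ws ih =>
    rw [pvT_cons]
    rcases List.mem_cons.1 hw with h | h
    · subst h
      unfold pvNextA
      split <;> simp
    · simp [ih h]

lemma pvT_card_le (wires : List (List Int)) : (pvT wires).card ≤ 2 * wires.length := by
  induction wires with
  | nil => simp [pvT]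
  | cons w ws ih =>
    rw [pvT_cons]
    calc (insert _ (insert _ (pvT ws))).card ≤ (insert _ (pvT ws)).card + 1 := Finset.card_insert_le _ _
      _ ≤ (pvT ws).card + 1 + 1 := by gcongr; exact Finset.card_insert_le _ _
      _ ≤ 2 * (w :: ws).length := by simp; omega

lemma pvAR_lift {wires : List (List Int)} {ex : List Int} {v acc : List Int} {t s u : Int}
    (hsub : ∀ x ∈ v, x ∈ acc) (hs : pvAR wires ex v t s) (h : pvAR wires ex acc s u) :
    pvAR wires ex v t u := by
  induction h with
  | refl => exact hs
  | tail _ hx hstep ih => exact pvAR.tail ih (fun hv => hx (hsub _ hv)) hstep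

-- the body of A's for-loop over wires, as a named fold function
def pvF (wires : List (List Int)) (first : List Int) (f : Nat) (t : Int) :
    List Int → List Int → List Int :=
  fun v' w => if w = first then v' else if t ∈ w then pvGoA wires first f (pvNextA w t) v' else v'

lemma pvGoA_succ_not_mem (wires : List (List Int)) (first : List Int) (f : Nat) (t : Int)
    (v : List Int) (htv : t ∉ v) :
    pvGoA wires first (f+1) t v = wires.foldl (pvF wires first f t) (PySem.Set.add v t) := by
  unfold pvF; rw [pvGoA]; simp [htv]

-- basic properties of pvGoA: monotone, keeps Nodup, start gets in (fuel ≥ 1), sound w.r.t. pvAR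
lemma pvGoA_basic (wires : List (List Int)) (first : List Int) :
    ∀ fuel (t : Int) (v : List Int), v.Nodup →
      (∀ x ∈ v, x ∈ pvGoA wires first fuel t v) ∧
      (pvGoA wires first fuel t v).Nodup ∧
      (1 ≤ fuel → t ∈ pvGoA wires first fuel t v) ∧
      (∀ u ∈ pvGoA wires first fuel t v, u ∈ v ∨ pvAR wires first v t u) := by
  intro fuel
  induction fuel with
  | zero =>
    intro t v hnd
    exact ⟨fun x hx => hx, hnd, by omega, fun u hu => .inl hu⟩
  | succ f ih =>
    intro t v hnd
    by_cases htv : t ∈ v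
    · rw [show pvGoA wires first (f+1) t v = v from by rw [pvGoA]; simp [htv]]
      exact ⟨fun x hx => hx, hnd, fun _ => htv, fun u hu => .inl hu⟩
    · rw [show pvGoA wires first (f+1) t v = wires.foldl (fun v' w =>
        if w = first then v'
        else if t ∈ w then pvGoA wires first f (pvNextA w t) v'
        else v') (PySem.Set.add v t) from by rw [pvGoA]; simp [htv]]
      have hQ : (fun acc : List Int => (∀ x ∈ v, x ∈ acc) ∧ t ∈ acc ∧ acc.Nodup ∧
          (∀ u ∈ acc, u ∈ v ∨ pvAR wires first v t u))
          (wires.foldl (fun v' w =>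
            if w = first then v'
            else if t ∈ w then pvGoA wires first f (pvNextA w t) v'
            else v') (PySem.Set.add v t)) := by
        refine List.foldlRecOn (motive := fun acc : List Int => (∀ x ∈ v, x ∈ acc) ∧ t ∈ acc ∧ acc.Nodup ∧
          (∀ u ∈ acc, u ∈ v ∨ pvAR wires first v t u)) wires _ ?_ ?_
        · refine ⟨?_, ?_, PySem.Set.nodup_add _ _ hnd, ?_⟩
          · intro x hx; exact (PySem.Set.mem_add _ _ _).2 (.inl hx)
          · exact (PySem.Set.mem_add _ _ _).2 (.inr rfl)
          · intro u hu
            rcases (PySem.Set.mem_add _ _ _).1 hu with h | h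
            · exact .inl h
            · subst h; exact .inr (pvAR.refl u)
        · intro acc hacc w hw
          obtain ⟨h1, h2, h3, h4⟩ := hacc
          by_cases hwf : w = first
          · simpa [hwf] using ⟨h1, h2, h3, h4⟩
          · by_cases htw : t ∈ w
            · simp only [if_neg hwf, if_pos htw]
              obtain ⟨m1, m2, m3, m4⟩ := ih (pvNextA w t) acc h3
              refine ⟨fun x hx => m1 _ (h1 _ hx), m1 _ h2, m2, ?_⟩
              intro u hu
              rcases m4 u hu with h | h
              · exact h4 u h
              · exact .inr (pvAR_lift h1
                  (pvAR.tail (pvAR.refl t) htv ⟨w, hw, hwf, htw, rfl⟩) h)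
            · simpa [hwf, htw] using ⟨h1, h2, h3, h4⟩
      obtain ⟨h1, h2, h3, h4⟩ := hQ
      exact ⟨h1, h3, fun _ => h2, h4⟩

-- with adequate fuel the result is closed under pvStep on its new elements
lemma pvGoA_closed (wires : List (List Int)) (first : List Int) :
    ∀ fuel (t : Int) (v : List Int), v.Nodup → t ∈ pvT wires →
      (pvT wires \ v.toFinset).card < fuel →
      ∀ x ∈ pvGoA wires first fuel t v, x ∉ v →
        ∀ u, pvStep wires first x u → u ∈ pvGoA wires first fuel t v := by
  intro fuel
  induction fuel with
  | zero => intro t v _ _ hf; omega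
  | succ f ih =>
    intro t v hnd ht hf
    by_cases htv : t ∈ v
    · rw [show pvGoA wires first (f+1) t v = v from by rw [pvGoA]; simp [htv]]
      intro x hx hxv
      exact absurd hx hxv
    · have hfge : ∀ acc : List Int, (∀ y ∈ v, y ∈ acc) → t ∈ acc →
          (pvT wires \ acc.toFinset).card < f := by
        intro acc hva hta
        have hsub : pvT wires \ acc.toFinset ⊆ (pvT wires \ v.toFinset).erase t := by
          intro y hy
          rw [Finset.mem_sdiff] at hy
          rw [Finset.mem_erase, Finset.mem_sdiff]
          refine ⟨?_, hy.1, ?_⟩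
          · rintro rfl; exact hy.2 (List.mem_toFinset.2 hta)
          · intro hyv; exact hy.2 (List.mem_toFinset.2 (hva _ (List.mem_toFinset.1 hyv)))
        have htmem : t ∈ pvT wires \ v.toFinset := by
          rw [Finset.mem_sdiff]; exact ⟨ht, fun h => htv (List.mem_toFinset.1 h)⟩
        have h1 := Finset.card_le_card hsub
        have h2 : ((pvT wires \ v.toFinset).erase t).card
            = (pvT wires \ v.toFinset).card - 1 := Finset.card_erase_of_mem htmem
        have h3 : 1 ≤ (pvT wires \ v.toFinset).card := Finset.card_pos.2 ⟨t, htmem⟩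
        omega
      rw [pvGoA_succ_not_mem wires first f t v htv]
      have key : ∀ ws : List (List Int), (∀ w ∈ ws, w ∈ wires) → ∀ acc : List Int,
          ((∀ y ∈ v, y ∈ acc) ∧ t ∈ acc ∧ acc.Nodup ∧
            (∀ x ∈ acc, x ∉ v → x ≠ t → ∀ u, pvStep wires first x u → u ∈ acc)) →
          (((∀ y ∈ v, y ∈ ws.foldl (pvF wires first f t) acc) ∧
            t ∈ ws.foldl (pvF wires first f t) acc ∧
            (ws.foldl (pvF wires first f t) acc).Nodup ∧
            (∀ x ∈ ws.foldl (pvF wires first f t) acc, x ∉ v → x ≠ t →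
              ∀ u, pvStep wires first x u → u ∈ ws.foldl (pvF wires first f t) acc)) ∧
           (∀ x ∈ acc, x ∈ ws.foldl (pvF wires first f t) acc) ∧
           (∀ w ∈ ws, w ≠ first → t ∈ w → pvNextA w t ∈ ws.foldl (pvF wires first f t) acc)) := by
        intro ws
        induction ws with
        | nil => intro _ acc hInv; exact ⟨hInv, fun x hx => hx, by simp⟩
        | cons w ws ihl =>
          intro hws acc hInv
          obtain ⟨h1, h2, h3, h4⟩ := hInv
          have hw : w ∈ wires := hws w (List.mem_cons_self ..)
          have hrest := fun w' hw' => hws w' (List.mem_cons_of_mem _ hw')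
          have step : ∀ acc' : List Int,
              ((∀ y ∈ v, y ∈ acc') ∧ t ∈ acc' ∧ acc'.Nodup ∧
                (∀ x ∈ acc', x ∉ v → x ≠ t → ∀ u, pvStep wires first x u → u ∈ acc')) →
              (∀ x ∈ acc, x ∈ acc') → (w ≠ first → t ∈ w → pvNextA w t ∈ acc') →
              (((∀ y ∈ v, y ∈ ws.foldl (pvF wires first f t) acc') ∧
                t ∈ ws.foldl (pvF wires first f t) acc' ∧
                (ws.foldl (pvF wires first f t) acc').Nodup ∧
                (∀ x ∈ ws.foldl (pvF wires first f t) acc', x ∉ v → x ≠ t →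
                  ∀ u, pvStep wires first x u → u ∈ ws.foldl (pvF wires first f t) acc')) ∧
               (∀ x ∈ acc, x ∈ ws.foldl (pvF wires first f t) acc') ∧
               (∀ w' ∈ w :: ws, w' ≠ first → t ∈ w' → pvNextA w' t ∈ ws.foldl (pvF wires first f t) acc')) := by
            intro acc' hInv' hmono hcond
            obtain ⟨⟨g1, g2, g3, g4⟩, gmono, gcond⟩ := ihl hrest acc' hInv'
            refine ⟨⟨g1, g2, g3, g4⟩, fun x hx => gmono x (hmono x hx), ?_⟩
            intro w' hw' hwf' htw'
            rcases List.mem_cons.1 hw' with rfl | hmem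
            · exact gmono _ (hcond hwf' htw')
            · exact gcond w' hmem hwf' htw'
          by_cases hwf : w = first
          · rw [show (w :: ws).foldl (pvF wires first f t) acc
                = ws.foldl (pvF wires first f t) acc from by simp [List.foldl_cons, pvF, hwf]]
            exact step acc ⟨h1, h2, h3, h4⟩ (fun x hx => hx) (fun h => absurd hwf h)
          · by_cases htw : t ∈ w
            · rw [show (w :: ws).foldl (pvF wires first f t) acc
                = ws.foldl (pvF wires first f t) (pvGoA wires first f (pvNextA w t) acc) from by
                  simp [List.foldl_cons, pvF, hwf, htw]]
              obtain ⟨m1, m2, m3, m4⟩ := pvGoA_basic wires first f (pvNextA w t) acc h3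
              have hf1 : 1 ≤ f := by have := hfge acc h1 h2; omega
              have hcl := ih (pvNextA w t) acc h3 (pvNextA_mem_T hw t) (hfge acc h1 h2)
              refine step (pvGoA wires first f (pvNextA w t) acc) ⟨?_, ?_, m2, ?_⟩ m1
                (fun _ _ => m3 hf1)
              · exact fun y hy => m1 y (h1 y hy)
              · exact m1 t h2
              · intro x hx hxv hxt u hstep
                by_cases hxacc : x ∈ acc
                · exact m1 u (h4 x hxacc hxv hxt u hstep)
                · exact hcl x hx hxacc u hstep
            · rw [show (w :: ws).foldl (pvF wires first f t) acc
                = ws.foldl (pvF wires first f t) acc from by simp [List.foldl_cons, pvF, hwf, htw]]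
              exact step acc ⟨h1, h2, h3, h4⟩ (fun x hx => hx) (fun _ h => absurd h htw)
      obtain ⟨⟨k1, k2, k3, k4⟩, kmono, kcond⟩ := key wires (fun _ h => h) (PySem.Set.add v t)
        ⟨fun y hy => (PySem.Set.mem_add _ _ _).2 (.inl hy),
         (PySem.Set.mem_add _ _ _).2 (.inr rfl),
         PySem.Set.nodup_add _ _ hnd,
         by
          intro x hx hxv hxt u _
          rcases (PySem.Set.mem_add _ _ _).1 hx with h | h
          · exact absurd h hxv
          · exact absurd h hxt⟩
      intro x hx hxv u hstep
      by_cases hxt : x = t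
      · subst hxt
        obtain ⟨w, hw, hwf, hxw, rfl⟩ := hstep
        exact kcond w hw hwf hxw
      · exact k4 x hx hxv hxt u hstep

lemma pvGoA_complete (wires : List (List Int)) (first : List Int)
    (fuel : Nat) (t : Int) (v : List Int) (hnd : v.Nodup) (ht : t ∈ pvT wires)
    (hf : (pvT wires \ v.toFinset).card < fuel) :
    ∀ u, pvAR wires first v t u → u ∈ pvGoA wires first fuel t v := by
  intro u h
  induction h with
  | refl =>
    have hf1 : 1 ≤ fuel := by omega
    exact (pvGoA_basic wires first fuel t v hnd).2.2.1 hf1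
  | tail _ hx hstep ih =>
    exact pvGoA_closed wires first fuel t v hnd ht hf _ ih hx _ hstep

-- characterization of A's DFS from scratch
lemma pvGoA_mem (wires : List (List Int)) (w : List Int) (t u : Int) (ht : t ∈ pvT wires) :
    u ∈ pvGoA wires w (2 * wires.length + 2) t PySem.Set.empty ↔ pvReach wires w t u := by
  have hnd : (PySem.Set.empty : List Int).Nodup := List.nodup_nil
  have hf : (pvT wires \ (PySem.Set.empty : List Int).toFinset).card < 2 * wires.length + 2 := by
    have := pvT_card_le wires
    simp only [PySem.Set.empty, List.toFinset_nil, Finset.sdiff_empty]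
    omega
  constructor
  · intro hu
    rcases (pvGoA_basic wires w _ t _ hnd).2.2.2 u hu with h | h
    · cases h
    · exact h
  · exact fun h => pvGoA_complete wires w _ t _ hnd ht hf u h

-- ===== B-side lemmas =====

def pvClosed (wires : List (List Int)) (removed : List Int) (v : List Int) : Prop :=
  ∀ w ∈ wires, w ≠ removed → ∀ t ∈ w, t ∈ v → pvNextA w t ∈ v

lemma pvNextB_eq : pvNextB = pvNextA := rfl

-- B's inner element loop over one wire w
def pvGB (w : List Int) : PySem.Set Int × Bool → Int → PySem.Set Int × Bool :=
  fun acc2 t =>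
    if t ∈ acc2.1 then
      if pvNextB w t ∈ acc2.1 then acc2
      else (PySem.Set.add acc2.1 (pvNextB w t), true)
    else acc2

-- B's wire loop (one sweep)
def pvFB (removed : List Int) : PySem.Set Int × Bool → List Int → PySem.Set Int × Bool :=
  fun acc w => if w = removed then acc else w.foldl (pvGB w) acc

lemma pvPassB_eq (wires : List (List Int)) (removed : List Int) (visit : PySem.Set Int) :
    pvPassB wires removed visit = wires.foldl (pvFB removed) (visit, false) := by
  unfold pvPassB pvFB pvGB
  rfl

lemma pvPassB_basic (wires : List (List Int)) (removed : List Int) (visit : List Int)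
    (hnd : visit.Nodup) :
    (∀ x ∈ visit, x ∈ (pvPassB wires removed visit).1) ∧
    (pvPassB wires removed visit).1.Nodup ∧
    (∀ u ∈ (pvPassB wires removed visit).1,
        u ∈ visit ∨ (u ∈ pvT wires ∧ ∃ s ∈ visit, pvReach wires removed s u)) ∧
    ((pvPassB wires removed visit).2 = true → visit.length < (pvPassB wires removed visit).1.length) := by
  rw [pvPassB_eq]
  refine List.foldlRecOn (motive := fun acc : PySem.Set Int × Bool =>
    (∀ x ∈ visit, x ∈ acc.1) ∧ acc.1.Nodup ∧
    (∀ u ∈ acc.1, u ∈ visit ∨ (u ∈ pvT wires ∧ ∃ s ∈ visit, pvReach wires removed s u)) ∧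
    (acc.2 = true → visit.length < acc.1.length)) wires _ ?_ ?_
  · exact ⟨fun x hx => hx, hnd, fun u hu => .inl hu, by simp⟩
  · intro acc hacc w hw
    by_cases hwr : w = removed
    · simpa [pvFB, hwr] using hacc
    · rw [show pvFB removed acc w = w.foldl (pvGB w) acc from by simp [pvFB, hwr]]
      refine List.foldlRecOn (motive := fun acc : PySem.Set Int × Bool =>
        (∀ x ∈ visit, x ∈ acc.1) ∧ acc.1.Nodup ∧
        (∀ u ∈ acc.1, u ∈ visit ∨ (u ∈ pvT wires ∧ ∃ s ∈ visit, pvReach wires removed s u)) ∧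
        (acc.2 = true → visit.length < acc.1.length)) w _ hacc ?_
      intro acc2 hacc2 t htw
      obtain ⟨h1, h2, h3, h4⟩ := hacc2
      by_cases ht1 : t ∈ acc2.1
      · by_cases hnb : pvNextB w t ∈ acc2.1
        · simpa [pvGB, ht1, hnb] using ⟨h1, h2, h3, h4⟩
        · rw [show pvGB w acc2 t = (PySem.Set.add acc2.1 (pvNextB w t), true) from by
            simp [pvGB, ht1, hnb]]
          have hlen : (PySem.Set.add acc2.1 (pvNextB w t)).length = acc2.1.length + 1 := by
            rw [PySem.Set.add_of_not_mem hnb, List.length_append]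
            rfl
          have hle : visit.length ≤ acc2.1.length := by
            have hsub : visit.toFinset ⊆ acc2.1.toFinset := fun y hy =>
              List.mem_toFinset.2 (h1 _ (List.mem_toFinset.1 hy))
            have := Finset.card_le_card hsub
            rwa [List.toFinset_card_of_nodup hnd, List.toFinset_card_of_nodup h2] at this
          refine ⟨fun x hx => (PySem.Set.mem_add _ _ _).2 (.inl (h1 x hx)),
            PySem.Set.nodup_add _ _ h2, ?_, by simp; omega⟩
          intro u hu
          rcases (PySem.Set.mem_add _ _ _).1 hu with h | h
          · exact h3 u h
          · subst h
            have hstep : pvStep wires removed t (pvNextB w t) := by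
              rw [pvNextB_eq]
              exact ⟨w, hw, hwr, htw, rfl⟩
            refine .inr ⟨by rw [pvNextB_eq]; exact pvNextA_mem_T hw t, ?_⟩
            rcases h3 t ht1 with hv | ⟨_, s, hs, hr⟩
            · exact ⟨t, hv, pvAR.tail (pvAR.refl t) (List.not_mem_nil) hstep⟩
            · exact ⟨s, hs, pvAR.tail hr (List.not_mem_nil) hstep⟩
      · simpa [pvGB, ht1] using ⟨h1, h2, h3, h4⟩

lemma pvPassB_false (wires : List (List Int)) (removed : List Int) (visit : List Int) :
    (pvPassB wires removed visit).2 = false →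
      (pvPassB wires removed visit).1 = visit ∧ pvClosed wires removed visit := by
  rw [pvPassB_eq]
  have inner : ∀ (w : List Int) (cs : List Int), (∀ c ∈ cs, c ∈ w) →
      ∀ acc : PySem.Set Int × Bool, (cs.foldl (pvGB w) acc).2 = false →
      acc.2 = false ∧ (cs.foldl (pvGB w) acc).1 = acc.1 ∧
      (∀ t ∈ cs, t ∈ acc.1 → pvNextA w t ∈ acc.1) := by
    intro w cs
    induction cs with
    | nil => intro _ acc h; exact ⟨h, rfl, by simp⟩
    | cons c cs ihc =>
      intro hcs acc hfalse
      rw [List.foldl_cons] at hfalse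
      obtain ⟨ha', hfold, hclos⟩ := ihc (fun c' hc' => hcs c' (List.mem_cons_of_mem _ hc'))
        (pvGB w acc c) hfalse
      have hacc : pvGB w acc c = acc := by
        by_cases hc1 : c ∈ acc.1
        · by_cases hnb : pvNextB w c ∈ acc.1
          · simp [pvGB, hc1, hnb]
          · exfalso
            rw [show pvGB w acc c = (PySem.Set.add acc.1 (pvNextB w c), true) from by
              simp [pvGB, hc1, hnb]] at ha'
            simp at ha'
        · simp [pvGB, hc1]
      rw [hacc] at ha' hfold hclos
      refine ⟨ha', by rw [List.foldl_cons, hacc, hfold], ?_⟩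
      intro t ht htacc
      rcases List.mem_cons.1 ht with rfl | hmem
      · by_cases hnb : pvNextB w t ∈ acc.1
        · rwa [pvNextB_eq] at hnb
        · exfalso
          rw [show pvGB w acc t = (PySem.Set.add acc.1 (pvNextB w t), true) from by
            simp [pvGB, htacc, hnb]] at hacc
          have : acc.2 = true := by rw [← hacc]
          rw [this] at ha'; simp at ha'
      · exact hclos t hmem htacc
  have outer : ∀ ws : List (List Int), (∀ w ∈ ws, w ∈ wires) →
      ∀ acc : PySem.Set Int × Bool, (ws.foldl (pvFB removed) acc).2 = false →
      acc.2 = false ∧ (ws.foldl (pvFB removed) acc).1 = acc.1 ∧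
      (∀ w ∈ ws, w ≠ removed → ∀ t ∈ w, t ∈ acc.1 → pvNextA w t ∈ acc.1) := by
    intro ws
    induction ws with
    | nil => intro _ acc h; exact ⟨h, rfl, by simp⟩
    | cons w ws ihw =>
      intro hws acc hfalse
      rw [List.foldl_cons] at hfalse
      obtain ⟨ha', hfold, hclos⟩ := ihw (fun w' hw' => hws w' (List.mem_cons_of_mem _ hw'))
        (pvFB removed acc w) hfalse
      by_cases hwr : w = removed
      · rw [show pvFB removed acc w = acc from by simp [pvFB, hwr]] at ha' hfold hclos
        refine ⟨ha', by rw [List.foldl_cons, show pvFB removed acc w = acc from by simp [pvFB, hwr], hfold], ?_⟩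
        intro w' hw' hwr' t htw' htacc
        rcases List.mem_cons.1 hw' with rfl | hmem
        · exact absurd hwr hwr'
        · exact hclos w' hmem hwr' t htw' htacc
      · rw [show pvFB removed acc w = w.foldl (pvGB w) acc from by simp [pvFB, hwr]] at ha' hfold hclos
        obtain ⟨ha2, hfold2, hclos2⟩ := inner w w (fun _ h => h) acc ha'
        refine ⟨ha2, ?_, ?_⟩
        · rw [List.foldl_cons, show pvFB removed acc w = w.foldl (pvGB w) acc from by simp [pvFB, hwr],
            hfold, hfold2]
        · intro w' hw' hwr' t htw' htacc
          rcases List.mem_cons.1 hw' with rfl | hmem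
          · exact hclos2 t htw' htacc
          · rw [← hfold2] at htacc ⊢
            exact hclos w' hmem hwr' t htw' htacc
  intro hfalse
  obtain ⟨_, hfold, hclos⟩ := outer wires (fun _ h => h) (visit, false) hfalse
  exact ⟨hfold, hclos⟩

lemma pvReach_trans {wires : List (List Int)} {ex : List Int} {s x u : Int}
    (h1 : pvReach wires ex s x) (h2 : pvReach wires ex x u) : pvReach wires ex s u :=
  pvAR_lift (fun y hy => hy) h1 h2

lemma pvLoopB_mem (wires : List (List Int)) (removed : List Int) :
    ∀ fuel (visit : List Int), visit.Nodup →
      (pvT wires \ visit.toFinset).card < fuel →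
      (pvLoopB wires removed fuel visit).Nodup ∧
      (∀ u, u ∈ pvLoopB wires removed fuel visit ↔
          ∃ s ∈ visit, pvReach wires removed s u) := by
  intro fuel
  induction fuel with
  | zero => intro visit _ hf; omega
  | succ f ih =>
    intro visit hnd hf
    obtain ⟨b1, b2, b3, b4⟩ := pvPassB_basic wires removed visit hnd
    rcases hp : (pvPassB wires removed visit).2 with _ | _
    · obtain ⟨hfix, hclos⟩ := pvPassB_false wires removed visit hp
      rw [show pvLoopB wires removed (f+1) visit = visit from by
        rw [pvLoopB]; simp only [hp]; simp [hfix]]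
      refine ⟨hnd, fun u => ⟨fun hu => ⟨u, hu, pvAR.refl u⟩, ?_⟩⟩
      rintro ⟨s, hs, hr⟩
      induction hr with
      | refl => exact hs
      | tail _ _ hstep ihr =>
        obtain ⟨w, hw, hwr, hxw, rfl⟩ := hstep
        exact hclos w hw hwr _ hxw ihr
    · rw [show pvLoopB wires removed (f+1) visit
        = pvLoopB wires removed f (pvPassB wires removed visit).1 from by
          rw [pvLoopB]; simp only [hp]; simp]
      have hgrow := b4 hp
      have hsubf : visit.toFinset ⊆ (pvPassB wires removed visit).1.toFinset := fun y hy =>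
        List.mem_toFinset.2 (b1 _ (List.mem_toFinset.1 hy))
      have hnew : ∃ y ∈ (pvPassB wires removed visit).1, y ∉ visit := by
        by_contra hno
        push Not at hno
        have : (pvPassB wires removed visit).1.toFinset = visit.toFinset :=
          Finset.Subset.antisymm (fun y hy => List.mem_toFinset.2 (hno _ (List.mem_toFinset.1 hy))) hsubf
        have := congrArg Finset.card this
        rw [List.toFinset_card_of_nodup hnd, List.toFinset_card_of_nodup b2] at this
        omega
      obtain ⟨y, hy1, hy2⟩ := hnew
      have hyT : y ∈ pvT wires := by
        rcases b3 y hy1 with h | h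
        · exact absurd h hy2
        · exact h.1
      have hflt : (pvT wires \ (pvPassB wires removed visit).1.toFinset).card
          < (pvT wires \ visit.toFinset).card := by
        apply Finset.card_lt_card
        rw [Finset.ssubset_iff_of_subset]
        · exact ⟨y, by rw [Finset.mem_sdiff]; exact ⟨hyT, fun h => hy2 (List.mem_toFinset.1 h)⟩,
            by rw [Finset.mem_sdiff]; push Not; intro _; exact List.mem_toFinset.2 hy1⟩
        · intro z hz
          rw [Finset.mem_sdiff] at hz ⊢
          exact ⟨hz.1, fun h => hz.2 (hsubf h)⟩
      obtain ⟨ihnd, ihmem⟩ := ih (pvPassB wires removed visit).1 b2 (by omega)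
      refine ⟨ihnd, fun u => ⟨?_, ?_⟩⟩
      · intro hu
        obtain ⟨s, hs, hr⟩ := (ihmem u).1 hu
        rcases b3 s hs with h | ⟨_, s0, hs0, hr0⟩
        · exact ⟨s, h, hr⟩
        · exact ⟨s0, hs0, pvReach_trans hr0 hr⟩
      · rintro ⟨s, hs, hr⟩
        exact (ihmem u).2 ⟨s, b1 s hs, hr⟩

-- ===== putting it together =====

lemma pvEnd_mem_T {wires : List (List Int)} {w : List Int} (hw : w ∈ wires) (i : Int) :
    ((PySem.List.pyGet? w i).getD 0 ∈ pvT wires) ∨ i ≠ 0 ∧ i ≠ 1 := by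
  induction wires with
  | nil => cases hw
  | cons w' ws ih =>
    rw [pvT_cons]
    rcases List.mem_cons.1 hw with h | h
    · subst h
      by_cases h0 : i = 0
      · subst h0; left; simp
      · by_cases h1 : i = 1
        · subst h1; left; simp
        · exact .inr ⟨h0, h1⟩
    · rcases ih h with hm | hne
      · left; simp [hm]
      · exact .inr hne

lemma pvComp_eq (wires : List (List Int)) (w : List Int) (t : Int) (ht : t ∈ pvT wires) :
    (pvGoA wires w (2 * wires.length + 2) t PySem.Set.empty).length
      = pvCompB t wires w := by
  have hcard : (pvT wires).card ≤ 2 * wires.length := pvT_card_le wires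
  have hndA := (pvGoA_basic wires w (2 * wires.length + 2) t PySem.Set.empty List.nodup_nil).2.1
  have hsingle : (PySem.Set.add PySem.Set.empty t) = [t] := rfl
  have hfB : (pvT wires \ (PySem.Set.add PySem.Set.empty t).toFinset).card
      < 2 * wires.length + 2 := by
    have := Finset.card_le_card (Finset.sdiff_subset
      (s := pvT wires) (t := (PySem.Set.add PySem.Set.empty t).toFinset))
    omega
  obtain ⟨hndB, hmemB⟩ := pvLoopB_mem wires w (2 * wires.length + 2)
    (PySem.Set.add PySem.Set.empty t) (by rw [hsingle]; simp) hfB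
  unfold pvCompB
  apply List.Perm.length_eq
  rw [List.perm_ext_iff_of_nodup hndA hndB]
  intro u
  rw [pvGoA_mem wires w t u ht, hmemB u, hsingle]
  constructor
  · exact fun h => ⟨t, List.mem_singleton.2 rfl, h⟩
  · rintro ⟨s, hs, hr⟩
    rwa [List.mem_singleton.1 hs] at hr

-- ===== VERDICT (by name: the statement is the Claim_ definition above) =====
theorem solution_spec : Claim_equal_solution := by
  intro n wires _ _
  unfold Spec_solution solution solution_alt
  apply PySem.List.foldl_congr_mem
  intro acc w hw
  have h0 : (PySem.List.pyGet? w 0).getD 0 ∈ pvT wires := by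
    rcases pvEnd_mem_T hw 0 with h | ⟨h, _⟩
    · exact h
    · exact absurd rfl h
  have h1 : (PySem.List.pyGet? w 1).getD 0 ∈ pvT wires := by
    rcases pvEnd_mem_T hw 1 with h | ⟨_, h⟩
    · exact h
    · exact absurd rfl h
  simp only [← pvComp_eq wires w _ h0, ← pvComp_eq wires w _ h1]
  generalize ((pvGoA wires w (2 * wires.length + 2) ((PySem.List.pyGet? w 0).getD 0)
      PySem.Set.empty).length : Int) = L
  generalize ((pvGoA wires w (2 * wires.length + 2) ((PySem.List.pyGet? w 1).getD 0)
      PySem.Set.empty).length : Int) = R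
  split_ifs <;> omega
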